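-- pv_equiv track=rewrite | github.com/MuhamedMuharam/CloudAgent | ai-agent-cloud/agent/core.py | build_policy_discovery_hint
-- ===== SOURCE A (Python) =====
-- POLICY_DOMAIN_TO_SECTIONS = {
--     "security_groups": ["security_groups"],
--     "ssm": ["ssm"],
--     "ec2": ["ec2", "general", "cost_optimization"],
--     "vpc": ["vpc", "general"],
--     "nat_gateway": ["nat_gateway", "general", "cost_optimization"],
-- }
--
-- def build_policy_discovery_hint(policies: dict) -> str:
--     """Build a tiny policy hint that avoids loading full policy content every run."""
--     if not policies:
--         return "POLICY ENFORCEMENT: No policy file loaded at runtime."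
--
--     available_domains = [
--         domain for domain, sections in POLICY_DOMAIN_TO_SECTIONS.items()
--         if any(section in policies for section in sections)
--     ]
--
--     return (
--         "POLICY ENFORCEMENT IS ACTIVE. "
--         "To reduce token usage, full policy content is not preloaded by default. "
--         "Relevant policy sections will be injected only when goal/tool intent requires them.\n"
--         f"Available policy domains: {', '.join(sorted(available_domains))}"
--     )
-- ===== SOURCE B (Python) =====
-- def build_policy_discovery_hint(policies: dict) -> str:
--     """Closed-form variant: no domain table, no sort; the five domains are tested
--     directly, already in alphabetical order."""
--     if not policies:
--         return "POLICY ENFORCEMENT: No policy file loaded at runtime."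
--
--     g = "general" in policies
--     c = "cost_optimization" in policies
--     parts = []
--     if "ec2" in policies or g or c:
--         parts.append("ec2")
--     if "nat_gateway" in policies or g or c:
--         parts.append("nat_gateway")
--     if "security_groups" in policies:
--         parts.append("security_groups")
--     if "ssm" in policies:
--         parts.append("ssm")
--     if "vpc" in policies or g:
--         parts.append("vpc")
--
--     return (
--         "POLICY ENFORCEMENT IS ACTIVE. "
--         "To reduce token usage, full policy content is not preloaded by default. "
--         "Relevant policy sections will be injected only when goal/tool intent requires them.\n"
--         f"Available policy domains: {', '.join(parts)}"
--     )
-- ===== Notes on version B (the rewrite author's own statement) =====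
-- stated objective: simpler
-- what changed: A filters the constant section table with a nested any-membership test and then sorts the surviving domain names; B drops the table and the sort entirely and emits the five fixed domains in pre-sorted alphabetical order, each guarded by a direct membership condition on the input keys.
import Mathlib
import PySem

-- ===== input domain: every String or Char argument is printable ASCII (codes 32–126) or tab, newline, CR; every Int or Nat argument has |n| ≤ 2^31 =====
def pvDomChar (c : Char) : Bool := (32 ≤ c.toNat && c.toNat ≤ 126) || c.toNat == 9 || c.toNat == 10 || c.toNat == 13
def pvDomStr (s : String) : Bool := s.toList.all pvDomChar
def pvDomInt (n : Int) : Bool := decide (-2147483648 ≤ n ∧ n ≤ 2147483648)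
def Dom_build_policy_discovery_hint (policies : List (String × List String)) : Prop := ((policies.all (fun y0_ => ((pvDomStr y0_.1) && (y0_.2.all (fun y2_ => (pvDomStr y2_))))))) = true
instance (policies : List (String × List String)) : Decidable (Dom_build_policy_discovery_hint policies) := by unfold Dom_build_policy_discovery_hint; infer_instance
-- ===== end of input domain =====

-- B drops A's constant section table and the sort: it emits the five domains in
-- pre-sorted alphabetical order, each guarded by a direct key-membership test; objective: simpler.

-- ===== PORT A =====
def pyPolicyDomainToSections : List (String × List String) :=
  [("security_groups", ["security_groups"]),
   ("ssm", ["ssm"]),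
   ("ec2", ["ec2", "general", "cost_optimization"]),
   ("vpc", ["vpc", "general"]),
   ("nat_gateway", ["nat_gateway", "general", "cost_optimization"])]

-- `section in policies` on a dict = key membership in the association list
def pyKeyIn (policies : List (String × List String)) (k : String) : Bool :=
  policies.any (fun p => p.1 == k)

def build_policy_discovery_hint (policies : List (String × List String)) : String :=
  if policies.isEmpty then
    "POLICY ENFORCEMENT: No policy file loaded at runtime."
  else
    let available_domains :=
      (pyPolicyDomainToSections.filter
        (fun ds => ds.2.any (fun s => pyKeyIn policies s))).map (fun ds => ds.1)
    "POLICY ENFORCEMENT IS ACTIVE. " ++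
    "To reduce token usage, full policy content is not preloaded by default. " ++
    "Relevant policy sections will be injected only when goal/tool intent requires them.\n" ++
    "Available policy domains: " ++
    PySem.Str.join ", " (PySem.List.sorted available_domains (fun x => x) false)

-- ===== PORT B =====
-- `k in policies` for B: key membership in the association list
def bHasKey (policies : List (String × List String)) (k : String) : Bool :=
  policies.any (fun p => p.1 == k)

def build_policy_discovery_hint_alt (policies : List (String × List String)) : String :=
  if policies.isEmpty then
    "POLICY ENFORCEMENT: No policy file loaded at runtime."
  else
    let g := bHasKey policies "general"
    let c := bHasKey policies "cost_optimization"
    let parts : List String :=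
      (if bHasKey policies "ec2" || g || c then ["ec2"] else []) ++
      (if bHasKey policies "nat_gateway" || g || c then ["nat_gateway"] else []) ++
      (if bHasKey policies "security_groups" then ["security_groups"] else []) ++
      (if bHasKey policies "ssm" then ["ssm"] else []) ++
      (if bHasKey policies "vpc" || g then ["vpc"] else [])
    "POLICY ENFORCEMENT IS ACTIVE. " ++
    "To reduce token usage, full policy content is not preloaded by default. " ++
    "Relevant policy sections will be injected only when goal/tool intent requires them.\n" ++
    "Available policy domains: " ++
    PySem.Str.join ", " parts

-- ===== PRECONDITION & SPEC =====
def Spec_build_policy_discovery_hint (policies : List (String × List String)) (out : String) : Prop := out = build_policy_discovery_hint_alt policies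
instance (policies : List (String × List String)) (out : String) : Decidable (Spec_build_policy_discovery_hint policies out) := by unfold Spec_build_policy_discovery_hint; infer_instance

-- ===== CLAIM (what is proved, stated in full; the proofs are below) =====
def Claim_equal_build_policy_discovery_hint : Prop := ∀ (policies : List (String × List String)), Dom_build_policy_discovery_hint policies → Spec_build_policy_discovery_hint policies (build_policy_discovery_hint policies)

-- ===== LEMMAS AND PROOFS =====

-- sorting A's filtered table (in table order, one Bool per entry) yields B's
-- alphabetical concatenation; checked over all 32 Boolean combinations
lemma sorted_table_eq (b1 b2 b3 b4 b5 : Bool) :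
    PySem.List.sorted
      ((if b1 then ["security_groups"] else []) ++ (if b2 then ["ssm"] else []) ++
       (if b3 then ["ec2"] else []) ++ (if b4 then ["vpc"] else []) ++
       (if b5 then ["nat_gateway"] else [])) (fun x => x) false =
    (if b3 then ["ec2"] else []) ++ (if b5 then ["nat_gateway"] else []) ++
    (if b1 then ["security_groups"] else []) ++ (if b2 then ["ssm"] else []) ++
    (if b4 then ["vpc"] else []) := by
  cases b1 <;> cases b2 <;> cases b3 <;> cases b4 <;> cases b5 <;>
    simp [PySem.List.sorted, PySem.List.insertBy] <;> decide

-- A's available_domains list, written as that Boolean concatenation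
lemma avail_eq (policies : List (String × List String)) :
    (pyPolicyDomainToSections.filter
        (fun ds => ds.2.any (fun s => pyKeyIn policies s))).map (fun ds => ds.1) =
    (if pyKeyIn policies "security_groups" then ["security_groups"] else []) ++
    (if pyKeyIn policies "ssm" then ["ssm"] else []) ++
    (if pyKeyIn policies "ec2" || pyKeyIn policies "general" || pyKeyIn policies "cost_optimization" then ["ec2"] else []) ++
    (if pyKeyIn policies "vpc" || pyKeyIn policies "general" then ["vpc"] else []) ++
    (if pyKeyIn policies "nat_gateway" || pyKeyIn policies "general" || pyKeyIn policies "cost_optimization" then ["nat_gateway"] else []) := by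
  cases h1 : pyKeyIn policies "security_groups" <;>
  cases h2 : pyKeyIn policies "ssm" <;>
  cases h3 : pyKeyIn policies "ec2" <;>
  cases h4 : pyKeyIn policies "vpc" <;>
  cases h5 : pyKeyIn policies "nat_gateway" <;>
  cases h6 : pyKeyIn policies "general" <;>
  cases h7 : pyKeyIn policies "cost_optimization" <;>
  simp [pyPolicyDomainToSections, List.filter, h1, h2, h3, h4, h5, h6, h7]

-- ===== VERDICT (by name: the statement is the Claim_ definition above) =====
theorem build_policy_discovery_hint_spec : Claim_equal_build_policy_discovery_hint := by
  unfold Claim_equal_build_policy_discovery_hint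
  intro policies _
  unfold Spec_build_policy_discovery_hint build_policy_discovery_hint build_policy_discovery_hint_alt
  by_cases hemp : policies.isEmpty
  · rw [if_pos hemp, if_pos hemp]
  · rw [if_neg hemp, if_neg hemp]
    have hbk : bHasKey policies = pyKeyIn policies := rfl
    simp only [hbk, avail_eq policies, sorted_table_eq]
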